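-- pv_equiv track=rewrite | github.com/zahirnik/DocWeave | scripts/show_api_errors.py | extract_last_traceback
-- ===== SOURCE A (Python) =====
-- def extract_last_traceback(lines: list[str]) -> list[str]:
--     tb_start = None
--     for i in range(len(lines)-1, -1, -1):
--         if lines[i].startswith("Traceback (most recent call last):"):
--             tb_start = i
--             break
--     if tb_start is None:
--         # Sometimes uvicorn formats exceptions prefixed with "ERROR:" lines; try a looser search
--         for i in range(len(lines)-1, -1, -1):
--             if "Traceback" in lines[i]:
--                 tb_start = i
--                 break
--     if tb_start is None:
--         return []
--     return lines[tb_start:]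
-- ===== SOURCE B (Python) =====
-- def extract_last_traceback(lines: list[str]) -> list[str]:
--     last_exact = None
--     last_loose = None
--     for i, line in enumerate(lines):
--         if line.startswith("Traceback (most recent call last):"):
--             last_exact = i
--         if "Traceback" in line:
--             last_loose = i
--     tb_start = last_exact if last_exact is not None else last_loose
--     if tb_start is None:
--         return []
--     return lines[tb_start:]
-- ===== Notes on version B (the rewrite author's own statement) =====
-- stated objective: alternative
-- what changed: Replaces A's two separate backward break-scans by one forward pass over enumerate(lines) that tracks the last exact-prefix match and the last loose 'Traceback' match simultaneously, picking the exact one by priority afterwards.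
import Mathlib
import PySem

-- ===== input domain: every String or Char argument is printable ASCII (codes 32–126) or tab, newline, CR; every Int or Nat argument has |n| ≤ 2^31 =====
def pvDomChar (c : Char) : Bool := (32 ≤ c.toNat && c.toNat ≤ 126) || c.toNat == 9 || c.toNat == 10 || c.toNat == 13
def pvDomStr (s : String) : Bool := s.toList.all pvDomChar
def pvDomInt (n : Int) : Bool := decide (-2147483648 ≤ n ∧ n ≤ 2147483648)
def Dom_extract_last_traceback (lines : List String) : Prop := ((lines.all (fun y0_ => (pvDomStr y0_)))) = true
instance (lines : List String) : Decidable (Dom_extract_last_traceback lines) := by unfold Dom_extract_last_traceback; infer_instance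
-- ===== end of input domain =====

-- B replaces A's two backward break-scans by one forward pass tracking both candidate
-- positions at once (objective: alternative decomposition, same cost).

-- ===== PORT A =====
def extract_last_traceback (lines : List String) : List String :=
  -- for i in range(len(lines)-1, -1, -1): if startswith: tb_start = i; break
  let tb₁ : Option Int :=
    (PySem.List.pyRange (PySem.List.len lines - 1) (-1) (-1)).find?
      (fun i => PySem.Str.startswith (PySem.List.pyGetD lines i "") "Traceback (most recent call last):")
  -- if tb_start is None: looser backward scan with 'Traceback' in lines[i]
  let tb_start : Option Int :=
    match tb₁ with
    | some i => some i
    | none =>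
      (PySem.List.pyRange (PySem.List.len lines - 1) (-1) (-1)).find?
        (fun i => PySem.Str.isIn "Traceback" (PySem.List.pyGetD lines i ""))
  match tb_start with
  | none => []
  | some i => PySem.List.slice lines (some i) none

-- ===== PORT B =====
def extract_last_traceback_alt (lines : List String) : List String :=
  -- one forward pass: (last_exact, last_loose)
  let st : Option Int × Option Int :=
    (PySem.List.enumerate lines 0).foldl
      (fun (acc : Option Int × Option Int) p =>
        (if PySem.Str.startswith p.2 "Traceback (most recent call last):" then some p.1 else acc.1,
         if PySem.Str.isIn "Traceback" p.2 then some p.1 else acc.2))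
      (none, none)
  -- tb_start = last_exact if last_exact is not None else last_loose
  let tb_start : Option Int :=
    match st.1 with
    | some i => some i
    | none => st.2
  match tb_start with
  | none => []
  | some i => PySem.List.slice lines (some i) none

-- ===== PRECONDITION & SPEC =====
def Spec_extract_last_traceback (lines : List String) (out : List String) : Prop := out = extract_last_traceback_alt lines
instance (lines : List String) (out : List String) : Decidable (Spec_extract_last_traceback lines out) := by unfold Spec_extract_last_traceback; infer_instance

-- ===== CLAIM (what is proved, stated in full; the proofs are below) =====
def Claim_equal_extract_last_traceback : Prop := ∀ (lines : List String), Dom_extract_last_traceback lines → Spec_extract_last_traceback lines (extract_last_traceback lines)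

-- ===== LEMMAS AND PROOFS =====

theorem pvFind?_congr_mem {α : Type} (l : List α) (p p' : α → Bool)
    (h : ∀ a ∈ l, p a = p' a) : l.find? p = l.find? p' := by
  induction l with
  | nil => rfl
  | cons x xs ih =>
      simp only [List.find?]
      rw [h x (by simp)]
      cases p' x
      · exact ih (fun a ha => h a (by simp [ha]))
      · rfl

theorem pvFoldl_pair {α β γ : Type} (f : β → α → β) (g : γ → α → γ)
    (l : List α) (b : β) (c : γ) :
    l.foldl (fun s a => (f s.1 a, g s.2 a)) (b, c) = (l.foldl f b, l.foldl g c) := by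
  induction l generalizing b c with
  | nil => rfl
  | cons x xs ih => simpa using ih (f b x) (g c x)

-- the backward break-scan equals the forward last-match fold, for any predicate
theorem pvScan_eq (q : String → Bool) (lines : List String) :
    (PySem.List.pyRange ((lines.length : Int) - 1) (-1) (-1)).find?
        (fun i => q (PySem.List.pyGetD lines i ""))
      = (PySem.List.enumerate lines 0).foldl
          (fun acc p => if q p.2 then some p.1 else acc) none := by
  induction lines using List.reverseRecOn with
  | nil =>
      rw [PySem.List.pyRange_neg_one_eq_nil (by simp)]
      rfl
  | append_singleton xs x ih =>
      have hlen : ((xs ++ [x]).length : Int) - 1 = (xs.length : Int) := by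
        simp
      rw [hlen, PySem.List.pyRange_neg_one_cons (by omega)]
      simp only [List.find?]
      have hx : PySem.List.pyGetD (xs ++ [x]) (xs.length : Int) "" = x := by
        rw [PySem.List.pyGetD_eq_getElem _ "" (by omega) (by simp)]
        simp
      rw [hx]
      have htail :
          (PySem.List.pyRange ((xs.length : Int) - 1) (-1) (-1)).find?
              (fun i => q (PySem.List.pyGetD (xs ++ [x]) i ""))
            = (PySem.List.pyRange ((xs.length : Int) - 1) (-1) (-1)).find?
              (fun i => q (PySem.List.pyGetD xs i "")) := by
        apply pvFind?_congr_mem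
        intro i hi
        rw [PySem.List.mem_pyRange_neg_one] at hi
        have h0 : (0 : Int) ≤ i := by omega
        have h1 : i < (xs.length : Int) := by omega
        rw [PySem.List.pyGetD_eq_getElem _ "" h0 (by simp; omega),
            PySem.List.pyGetD_eq_getElem _ "" h0 h1,
            List.getElem_append_left (by omega)]
      rw [htail, ih, PySem.List.enumerate_append, List.foldl_append]
      simp [PySem.List.enumerate_cons, PySem.List.enumerate_nil]
      cases q x <;> simp

-- ===== VERDICT (by name: the statement is the Claim_ definition above) =====
theorem extract_last_traceback_spec : Claim_equal_extract_last_traceback := by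
  intro lines _
  unfold Spec_extract_last_traceback extract_last_traceback extract_last_traceback_alt
  simp only [PySem.List.len_eq,
    pvFoldl_pair
      (fun (b : Option Int) (p : Int × String) =>
        if PySem.Str.startswith p.2 "Traceback (most recent call last):" then some p.1 else b)
      (fun (c : Option Int) (p : Int × String) =>
        if PySem.Str.isIn "Traceback" p.2 then some p.1 else c)
      (PySem.List.enumerate lines 0) none none,
    pvScan_eq (fun s => PySem.Str.startswith s "Traceback (most recent call last):") lines,
    pvScan_eq (fun s => PySem.Str.isIn "Traceback" s) lines]
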